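-- pv_equiv track=rewrite | github.com/colinbedlington-Kier/IFC_Apps | check_definitions_loader.py | _section_for_entities
-- ===== SOURCE A (Python) =====
-- from typing import Dict, List, Optional
--
-- def _section_for_entities(entities: List[str]) -> str:
--     ents = [e.lower() for e in entities]
--     if any("ifcproject" in e for e in ents):
--         return "Project"
--     if any("ifcsite" in e or "ifcbuilding" in e for e in ents):
--         return "Site / Building"
--     if any("ifcbuildingstorey" in e for e in ents):
--         return "Storeys"
--     if any("ifcspace" in e for e in ents):
--         return "Spaces"
--     if any("type" in e for e in ents):
--         return "Object Types"
--     if any("occurrence" in e for e in ents):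
--         return "Object Occurrences"
--     return "Object Occurrences"
-- ===== SOURCE B (Python) =====
-- _LABELS = ["Project", "Site / Building", "Storeys", "Spaces", "Object Types", "Object Occurrences"]
--
--
-- def _rank(e):
--     if "ifcproject" in e:
--         return 0
--     if "ifcsite" in e or "ifcbuilding" in e:
--         return 1
--     if "ifcbuildingstorey" in e:
--         return 2
--     if "ifcspace" in e:
--         return 3
--     if "type" in e:
--         return 4
--     if "occurrence" in e:
--         return 5
--     return 6
--
--
-- def _section_for_entities(entities):
--     best = 6
--     for entity in entities:
--         best = min(best, _rank(entity.lower()))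
--     return _LABELS[best] if best < 6 else "Object Occurrences"
-- ===== Notes on version B (the rewrite author's own statement) =====
-- stated objective: alternative
-- what changed: Replaces A's six sequential any()-scans over the lowered list by a single pass that keeps the minimum matched priority rank per entity and maps that rank to its label afterwards.
import Mathlib
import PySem

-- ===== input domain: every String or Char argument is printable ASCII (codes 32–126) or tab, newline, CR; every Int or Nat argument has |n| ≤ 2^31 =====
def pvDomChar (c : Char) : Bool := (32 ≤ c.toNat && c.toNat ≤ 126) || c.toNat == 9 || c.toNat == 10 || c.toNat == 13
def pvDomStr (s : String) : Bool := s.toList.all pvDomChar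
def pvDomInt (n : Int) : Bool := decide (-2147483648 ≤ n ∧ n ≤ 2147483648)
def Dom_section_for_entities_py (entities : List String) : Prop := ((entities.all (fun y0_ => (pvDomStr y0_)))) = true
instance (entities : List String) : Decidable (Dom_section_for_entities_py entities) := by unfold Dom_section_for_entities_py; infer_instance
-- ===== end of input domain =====

-- B replaces A's six sequential any()-scans over the lowered list by one pass keeping the minimum matched priority rank per entity, mapped to its label afterwards (alternative decomposition, same cost).

-- ===== PORT A =====
def section_for_entities_py (entities : List String) : String :=
  let ents := entities.map PySem.Str.lower
  if ents.any (fun e => PySem.Str.isIn "ifcproject" e) then "Project"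
  else if ents.any (fun e => PySem.Str.isIn "ifcsite" e || PySem.Str.isIn "ifcbuilding" e) then "Site / Building"
  else if ents.any (fun e => PySem.Str.isIn "ifcbuildingstorey" e) then "Storeys"
  else if ents.any (fun e => PySem.Str.isIn "ifcspace" e) then "Spaces"
  else if ents.any (fun e => PySem.Str.isIn "type" e) then "Object Types"
  else if ents.any (fun e => PySem.Str.isIn "occurrence" e) then "Object Occurrences"
  else "Object Occurrences"

-- ===== PORT B =====
def pvLabels : List String :=
  ["Project", "Site / Building", "Storeys", "Spaces", "Object Types", "Object Occurrences"]

def pvRank (e : String) : Nat :=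
  if PySem.Str.isIn "ifcproject" e then 0
  else if PySem.Str.isIn "ifcsite" e || PySem.Str.isIn "ifcbuilding" e then 1
  else if PySem.Str.isIn "ifcbuildingstorey" e then 2
  else if PySem.Str.isIn "ifcspace" e then 3
  else if PySem.Str.isIn "type" e then 4
  else if PySem.Str.isIn "occurrence" e then 5
  else 6

def section_for_entities_py_alt (entities : List String) : String :=
  let best := entities.foldl (fun b entity => min b (pvRank (PySem.Str.lower entity))) 6
  if best < 6 then PySem.List.pyGetD pvLabels (best : Int) "Object Occurrences"
  else "Object Occurrences"

-- ===== PRECONDITION & SPEC =====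
def Spec_section_for_entities_py (entities : List String) (out : String) : Prop := out = section_for_entities_py_alt entities
instance (entities : List String) (out : String) : Decidable (Spec_section_for_entities_py entities out) := by unfold Spec_section_for_entities_py; infer_instance

-- ===== CLAIM (what is proved, stated in full; the proofs are below) =====
def Claim_equal_section_for_entities_py : Prop := ∀ (entities : List String), Dom_section_for_entities_py entities → Spec_section_for_entities_py entities (section_for_entities_py entities)

-- ===== LEMMAS AND PROOFS =====

-- minimum rank of a list of (not yet lowered) entities
def pvMr : List String → Nat
  | [] => 6
  | x :: t => min (pvRank (PySem.Str.lower x)) (pvMr t)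

-- the common label function both ports compute
def pvLab (b : Nat) : String :=
  if b = 0 then "Project"
  else if b = 1 then "Site / Building"
  else if b = 2 then "Storeys"
  else if b = 3 then "Spaces"
  else if b = 4 then "Object Types"
  else "Object Occurrences"

theorem pvMr_le_six (l : List String) : pvMr l ≤ 6 := by
  induction l with
  | nil => simp [pvMr]
  | cons x t ih => simp [pvMr]; omega

-- forward: a matched branch condition bounds the rank
theorem pvRank_r0 (x : String) (h : PySem.Str.isIn "ifcproject" x = true) : pvRank x ≤ 0 := by
  unfold pvRank; split_ifs <;> simp_all
theorem pvRank_r1 (x : String) (h : (PySem.Str.isIn "ifcsite" x || PySem.Str.isIn "ifcbuilding" x) = true) : pvRank x ≤ 1 := by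
  unfold pvRank; split_ifs <;> simp_all
theorem pvRank_r2 (x : String) (h : PySem.Str.isIn "ifcbuildingstorey" x = true) : pvRank x ≤ 2 := by
  unfold pvRank; split_ifs <;> simp_all
theorem pvRank_r3 (x : String) (h : PySem.Str.isIn "ifcspace" x = true) : pvRank x ≤ 3 := by
  unfold pvRank; split_ifs <;> simp_all
theorem pvRank_r4 (x : String) (h : PySem.Str.isIn "type" x = true) : pvRank x ≤ 4 := by
  unfold pvRank; split_ifs <;> simp_all

-- backward: a small rank exhibits one of the leading conditions
theorem pvRank_b0 (x : String) (h : pvRank x ≤ 0) : PySem.Str.isIn "ifcproject" x = true := by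
  unfold pvRank at h
  split_ifs at h with a b c d e f
  · exact a
  all_goals exact absurd h (by norm_num)
theorem pvRank_b1 (x : String) (h : pvRank x ≤ 1) :
    PySem.Str.isIn "ifcproject" x = true ∨ (PySem.Str.isIn "ifcsite" x || PySem.Str.isIn "ifcbuilding" x) = true := by
  unfold pvRank at h
  split_ifs at h with a b c d e f
  · exact Or.inl a
  · exact Or.inr b
  all_goals exact absurd h (by norm_num)
theorem pvRank_b2 (x : String) (h : pvRank x ≤ 2) :
    PySem.Str.isIn "ifcproject" x = true ∨ (PySem.Str.isIn "ifcsite" x || PySem.Str.isIn "ifcbuilding" x) = true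
      ∨ PySem.Str.isIn "ifcbuildingstorey" x = true := by
  unfold pvRank at h
  split_ifs at h with a b c d e f
  · exact Or.inl a
  · exact Or.inr (Or.inl b)
  · exact Or.inr (Or.inr c)
  all_goals exact absurd h (by norm_num)
theorem pvRank_b3 (x : String) (h : pvRank x ≤ 3) :
    PySem.Str.isIn "ifcproject" x = true ∨ (PySem.Str.isIn "ifcsite" x || PySem.Str.isIn "ifcbuilding" x) = true
      ∨ PySem.Str.isIn "ifcbuildingstorey" x = true ∨ PySem.Str.isIn "ifcspace" x = true := by
  unfold pvRank at h
  split_ifs at h with a b c d e f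
  · exact Or.inl a
  · exact Or.inr (Or.inl b)
  · exact Or.inr (Or.inr (Or.inl c))
  · exact Or.inr (Or.inr (Or.inr d))
  all_goals exact absurd h (by norm_num)
theorem pvRank_b4 (x : String) (h : pvRank x ≤ 4) :
    PySem.Str.isIn "ifcproject" x = true ∨ (PySem.Str.isIn "ifcsite" x || PySem.Str.isIn "ifcbuilding" x) = true
      ∨ PySem.Str.isIn "ifcbuildingstorey" x = true ∨ PySem.Str.isIn "ifcspace" x = true
      ∨ PySem.Str.isIn "type" x = true := by
  unfold pvRank at h
  split_ifs at h with a b c d e f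
  · exact Or.inl a
  · exact Or.inr (Or.inl b)
  · exact Or.inr (Or.inr (Or.inl c))
  · exact Or.inr (Or.inr (Or.inr (Or.inl d)))
  · exact Or.inr (Or.inr (Or.inr (Or.inr e)))
  all_goals exact absurd h (by norm_num)

theorem pvMr_le_iff (l : List String) (i : Nat) (hi : i ≤ 5) :
    pvMr l ≤ i ↔ ∃ x ∈ l, pvRank (PySem.Str.lower x) ≤ i := by
  induction l with
  | nil => simp [pvMr]; omega
  | cons x t ih => simp [pvMr, ih]

theorem pv_foldl_min (l : List String) :
    ∀ a, a ≤ 6 → l.foldl (fun b entity => min b (pvRank (PySem.Str.lower entity))) a = min a (pvMr l) := by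
  induction l with
  | nil => intro a ha; simp [pvMr]; omega
  | cons x t ih =>
      intro a ha
      have : min a (pvRank (PySem.Str.lower x)) ≤ 6 := le_trans (min_le_left _ _) ha
      simp only [List.foldl_cons, pvMr, ih _ this, min_assoc]

theorem pv_alt_eq (l : List String) : section_for_entities_py_alt l = pvLab (pvMr l) := by
  unfold section_for_entities_py_alt
  rw [pv_foldl_min l 6 (by omega), min_eq_right (pvMr_le_six l)]
  have h6 := pvMr_le_six l
  set b := pvMr l with hb
  interval_cases b <;> rfl

theorem pv_a_eq (l : List String) : section_for_entities_py l = pvLab (pvMr l) := by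
  unfold section_for_entities_py
  simp only [List.any_map, Function.comp_def]
  by_cases h1 : l.any (fun x => PySem.Str.isIn "ifcproject" (PySem.Str.lower x)) = true
  · obtain ⟨x, hx, hpx⟩ := List.any_eq_true.mp h1
    have hm : pvMr l ≤ 0 := (pvMr_le_iff l 0 (by omega)).mpr ⟨x, hx, pvRank_r0 _ hpx⟩
    rw [if_pos h1, show pvMr l = 0 by omega]; rfl
  · rw [if_neg h1]
    have hn1 : ¬ pvMr l ≤ 0 := fun hm => by
      obtain ⟨x, hx, hr⟩ := (pvMr_le_iff l 0 (by omega)).mp hm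
      exact h1 (List.any_eq_true.mpr ⟨x, hx, pvRank_b0 _ hr⟩)
    by_cases h2 : l.any (fun x => PySem.Str.isIn "ifcsite" (PySem.Str.lower x) || PySem.Str.isIn "ifcbuilding" (PySem.Str.lower x)) = true
    · obtain ⟨x, hx, hpx⟩ := List.any_eq_true.mp h2
      have hm : pvMr l ≤ 1 := (pvMr_le_iff l 1 (by omega)).mpr ⟨x, hx, pvRank_r1 _ hpx⟩
      rw [if_pos h2, show pvMr l = 1 by omega]; rfl
    · rw [if_neg h2]
      have hn2 : ¬ pvMr l ≤ 1 := fun hm => by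
        obtain ⟨x, hx, hr⟩ := (pvMr_le_iff l 1 (by omega)).mp hm
        rcases pvRank_b1 _ hr with h | h
        · exact h1 (List.any_eq_true.mpr ⟨x, hx, h⟩)
        · exact h2 (List.any_eq_true.mpr ⟨x, hx, h⟩)
      by_cases h3 : l.any (fun x => PySem.Str.isIn "ifcbuildingstorey" (PySem.Str.lower x)) = true
      · obtain ⟨x, hx, hpx⟩ := List.any_eq_true.mp h3
        have hm : pvMr l ≤ 2 := (pvMr_le_iff l 2 (by omega)).mpr ⟨x, hx, pvRank_r2 _ hpx⟩
        rw [if_pos h3, show pvMr l = 2 by omega]; rfl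
      · rw [if_neg h3]
        have hn3 : ¬ pvMr l ≤ 2 := fun hm => by
          obtain ⟨x, hx, hr⟩ := (pvMr_le_iff l 2 (by omega)).mp hm
          rcases pvRank_b2 _ hr with h | h | h
          · exact h1 (List.any_eq_true.mpr ⟨x, hx, h⟩)
          · exact h2 (List.any_eq_true.mpr ⟨x, hx, h⟩)
          · exact h3 (List.any_eq_true.mpr ⟨x, hx, h⟩)
        by_cases h4 : l.any (fun x => PySem.Str.isIn "ifcspace" (PySem.Str.lower x)) = true
        · obtain ⟨x, hx, hpx⟩ := List.any_eq_true.mp h4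
          have hm : pvMr l ≤ 3 := (pvMr_le_iff l 3 (by omega)).mpr ⟨x, hx, pvRank_r3 _ hpx⟩
          rw [if_pos h4, show pvMr l = 3 by omega]; rfl
        · rw [if_neg h4]
          have hn4 : ¬ pvMr l ≤ 3 := fun hm => by
            obtain ⟨x, hx, hr⟩ := (pvMr_le_iff l 3 (by omega)).mp hm
            rcases pvRank_b3 _ hr with h | h | h | h
            · exact h1 (List.any_eq_true.mpr ⟨x, hx, h⟩)
            · exact h2 (List.any_eq_true.mpr ⟨x, hx, h⟩)
            · exact h3 (List.any_eq_true.mpr ⟨x, hx, h⟩)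
            · exact h4 (List.any_eq_true.mpr ⟨x, hx, h⟩)
          by_cases h5 : l.any (fun x => PySem.Str.isIn "type" (PySem.Str.lower x)) = true
          · obtain ⟨x, hx, hpx⟩ := List.any_eq_true.mp h5
            have hm : pvMr l ≤ 4 := (pvMr_le_iff l 4 (by omega)).mpr ⟨x, hx, pvRank_r4 _ hpx⟩
            rw [if_pos h5, show pvMr l = 4 by omega]; rfl
          · rw [if_neg h5]
            have hn5 : ¬ pvMr l ≤ 4 := fun hm => by
              obtain ⟨x, hx, hr⟩ := (pvMr_le_iff l 4 (by omega)).mp hm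
              rcases pvRank_b4 _ hr with h | h | h | h | h
              · exact h1 (List.any_eq_true.mpr ⟨x, hx, h⟩)
              · exact h2 (List.any_eq_true.mpr ⟨x, hx, h⟩)
              · exact h3 (List.any_eq_true.mpr ⟨x, hx, h⟩)
              · exact h4 (List.any_eq_true.mpr ⟨x, hx, h⟩)
              · exact h5 (List.any_eq_true.mpr ⟨x, hx, h⟩)
            have hlab : pvLab (pvMr l) = "Object Occurrences" := by
              unfold pvLab; split_ifs <;> first | rfl | omega
            by_cases h6 : l.any (fun x => PySem.Str.isIn "occurrence" (PySem.Str.lower x)) = true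
            · rw [if_pos h6, hlab]
            · rw [if_neg h6, hlab]

-- ===== VERDICT (by name: the statement is the Claim_ definition above) =====
theorem section_for_entities_py_spec : Claim_equal_section_for_entities_py := by
  intro entities _
  unfold Spec_section_for_entities_py
  rw [pv_a_eq, pv_alt_eq]
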